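-- pv_equiv track=rewrite | github.com/miiiingi/algorithmstudy | bruteforce/1.py | solution
-- ===== SOURCE A (Python) =====
-- def count(array, answers) :
--     _count = 0
--     for x, y in zip(array, answers) :
--         if x == y :
--             _count += 1
--     return _count
--
-- def make_strings(array, answers) :
--     len_answers = len(answers)
--     mok = len_answers // len(array)
--     if mok == 0 :
--         array_ = array[:(len_answers % len(array))]
--     else :
--         array_ = array * mok + array[:(len_answers % len(array))]
--     return array_
--
-- def solution(answers) :
--     answer = []
--     len_answers = len(answers)
--     _first = [1,2,3,4,5]
--     _second = [2,1,2,3,2,4,2,5]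
--     _third = [3,3,1,1,2,2,4,4,5,5]
--     first = make_strings(_first, answers)
--     second = make_strings(_second, answers)
--     third = make_strings(_third, answers)
--     num_first = count(first, answers)
--     num_second = count(second, answers)
--     num_third = count(third, answers)
--     num_max = max(num_first, num_second, num_third)
--     num_list = [num_first, num_second, num_third]
--     for ind, x in enumerate(num_list) :
--         if x == num_max :
--             answer.append((ind+1))
--     return sorted(answer)
-- ===== SOURCE B (Python) =====
-- def solution(answers):
--     p1 = [1, 2, 3, 4, 5]
--     p2 = [2, 1, 2, 3, 2, 4, 2, 5]
--     p3 = [3, 3, 1, 1, 2, 2, 4, 4, 5, 5]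
--     s1 = s2 = s3 = 0
--     for i, a in enumerate(answers):
--         if a == p1[i % 5]:
--             s1 += 1
--         if a == p2[i % 8]:
--             s2 += 1
--         if a == p3[i % 10]:
--             s3 += 1
--     num_max = max(s1, s2, s3)
--     answer = []
--     for ind, x in enumerate([s1, s2, s3]):
--         if x == num_max:
--             answer.append(ind + 1)
--     return sorted(answer)
-- ===== Notes on version B (the rewrite author's own statement) =====
-- stated objective: simpler
-- what changed: B never materializes the three truncated/repeated pattern lists: instead of three make_strings builds followed by three zip-count passes, it does one enumerate pass over answers and compares each answer against the fixed patterns via modular indexing.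
import Mathlib
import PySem

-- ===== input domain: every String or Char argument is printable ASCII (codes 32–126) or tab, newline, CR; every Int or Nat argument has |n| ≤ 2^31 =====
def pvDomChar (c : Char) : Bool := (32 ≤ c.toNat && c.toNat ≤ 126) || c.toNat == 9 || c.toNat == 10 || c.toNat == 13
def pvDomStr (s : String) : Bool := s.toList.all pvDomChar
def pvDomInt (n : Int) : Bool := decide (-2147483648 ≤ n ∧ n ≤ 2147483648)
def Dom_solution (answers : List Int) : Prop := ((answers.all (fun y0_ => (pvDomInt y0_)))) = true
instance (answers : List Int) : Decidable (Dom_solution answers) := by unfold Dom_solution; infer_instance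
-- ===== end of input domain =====

-- B replaces A's three make_strings builds plus three zip-count passes by a single
-- modular-indexed pass over the answers (objective: simpler, no materialized pattern lists).

-- ===== PORT A =====
-- count: fold over zip(array, answers)
def pvCount (array answers : List Int) : Int :=
  (List.zip array answers).foldl (fun c q => if q.1 = q.2 then c + 1 else c) 0

-- make_strings: lengths are nonnegative, so Python's // and % are Nat / and %,
-- and array[:k] with 0 ≤ k ≤ len(array) is List.take k (exact here); list*mok is flatten (replicate mok)
def pvMakeStrings (array answers : List Int) : List Int :=
  let mok := answers.length / array.length
  if mok = 0 then array.take (answers.length % array.length)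
  else List.flatten (List.replicate mok array) ++ array.take (answers.length % array.length)

def solution (answers : List Int) : List Int :=
  let first := pvMakeStrings [1,2,3,4,5] answers
  let second := pvMakeStrings [2,1,2,3,2,4,2,5] answers
  let third := pvMakeStrings [3,3,1,1,2,2,4,4,5,5] answers
  let numFirst := pvCount first answers
  let numSecond := pvCount second answers
  let numThird := pvCount third answers
  let numMax := max numFirst (max numSecond numThird)
  let answer := (PySem.List.enumerate [numFirst, numSecond, numThird] 0).foldl
    (fun acc q => if q.2 = numMax then acc ++ [q.1 + 1] else acc) ([] : List Int)
  PySem.List.sorted answer (fun x => x) false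

-- ===== PORT B =====
-- single enumerate pass; p[i % L] is in range for every i ≥ 0, so pyGetD is exact here
def solution_alt (answers : List Int) : List Int :=
  let p1 : List Int := [1,2,3,4,5]
  let p2 : List Int := [2,1,2,3,2,4,2,5]
  let p3 : List Int := [3,3,1,1,2,2,4,4,5,5]
  let s := (PySem.List.enumerate answers 0).foldl
    (fun (s : Int × Int × Int) q =>
      (if q.2 = PySem.List.pyGetD p1 (PySem.Int.mod q.1 5) 0 then s.1 + 1 else s.1,
       if q.2 = PySem.List.pyGetD p2 (PySem.Int.mod q.1 8) 0 then s.2.1 + 1 else s.2.1,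
       if q.2 = PySem.List.pyGetD p3 (PySem.Int.mod q.1 10) 0 then s.2.2 + 1 else s.2.2))
    ((0 : Int), (0 : Int), (0 : Int))
  let numMax := max s.1 (max s.2.1 s.2.2)
  let answer := (PySem.List.enumerate [s.1, s.2.1, s.2.2] 0).foldl
    (fun acc q => if q.2 = numMax then acc ++ [q.1 + 1] else acc) ([] : List Int)
  PySem.List.sorted answer (fun x => x) false

-- ===== PRECONDITION & SPEC =====
def Spec_solution (answers : List Int) (out : List Int) : Prop := out = solution_alt answers
instance (answers : List Int) (out : List Int) : Decidable (Spec_solution answers out) := by unfold Spec_solution; infer_instance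

-- ===== CLAIM (what is proved, stated in full; the proofs are below) =====
def Claim_equal_solution : Prop := ∀ (answers : List Int), Dom_solution answers → Spec_solution answers (solution answers)

-- ===== LEMMAS AND PROOFS =====

-- a fold with three independent components splits into three folds
theorem pv_foldl_triple (l : List (Int × Int)) (g1 g2 g3 : Int → (Int × Int) → Int) :
    ∀ (a b c : Int),
      l.foldl (fun (s : Int × Int × Int) q => (g1 s.1 q, g2 s.2.1 q, g3 s.2.2 q)) (a, b, c)
        = (l.foldl g1 a, l.foldl g2 b, l.foldl g3 c) := by
  induction l with
  | nil => intro a b c; rfl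
  | cons x t ih => intro a b c; simpa using ih (g1 a x) (g2 b x) (g3 c x)

theorem pv_take_eq_map_range (p : List Int) (r : Nat) (hr : r ≤ p.length) :
    p.take r = (List.range r).map (fun i => p.getD (i % p.length) 0) := by
  apply List.ext_getElem
  · simpa using hr
  · intro i h1 h2
    have hi : i < r := by simpa using h2
    have hip : i < p.length := lt_of_lt_of_le hi hr
    simp [List.getElem_take, Nat.mod_eq_of_lt hip, List.getD_eq_getElem?_getD,
      List.getElem?_eq_getElem hip]

theorem pv_rep_take (p : List Int) (r : Nat) (hr : r ≤ p.length) :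
    ∀ (m : Nat), List.flatten (List.replicate m p) ++ p.take r
      = (List.range (m * p.length + r)).map (fun i => p.getD (i % p.length) 0) := by
  intro m
  induction m with
  | zero => simpa using pv_take_eq_map_range p r hr
  | succ m ih =>
    have hsplit : List.range ((m + 1) * p.length + r)
        = List.range p.length ++ (List.range (m * p.length + r)).map (p.length + ·) := by
      rw [show (m + 1) * p.length + r = p.length + (m * p.length + r) by ring]
      exact List.range_add
    rw [hsplit, List.map_append, List.map_map]
    have h1 : (List.range p.length).map (fun i => p.getD (i % p.length) 0) = p := by
      rw [← pv_take_eq_map_range p p.length le_rfl]; simp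
    have h2 : ((List.range (m * p.length + r)).map
        ((fun i => p.getD (i % p.length) 0) ∘ (p.length + ·)))
        = (List.range (m * p.length + r)).map (fun i => p.getD (i % p.length) 0) := by
      apply List.map_congr_left; intro i _
      simp [Function.comp, Nat.add_mod_left]
    rw [h1, h2, List.replicate_succ, List.flatten_cons, List.append_assoc, ih]

theorem pv_make_eq (p ans : List Int) (hp : 0 < p.length) :
    pvMakeStrings p ans = (List.range ans.length).map (fun i => p.getD (i % p.length) 0) := by
  have hr : ans.length % p.length ≤ p.length := le_of_lt (Nat.mod_lt _ hp)
  have hn : ans.length / p.length * p.length + ans.length % p.length = ans.length := by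
    rw [Nat.mul_comm]; exact Nat.div_add_mod _ _
  have key : List.flatten (List.replicate (ans.length / p.length) p)
      ++ p.take (ans.length % p.length)
      = (List.range ans.length).map (fun i => p.getD (i % p.length) 0) := by
    rw [pv_rep_take p _ hr, hn]
  simp only [pvMakeStrings]
  split_ifs with h
  · rw [h] at key; simpa using key
  · exact key

theorem pv_count_enum (p : List Int) :
    ∀ (ans : List Int) (k : Nat) (c : Int),
      (List.zip ((List.range' k ans.length).map (fun i => p.getD (i % p.length) 0)) ans).foldl
          (fun c q => if q.1 = q.2 then c + 1 else c) c
        = (PySem.List.enumerate ans (k : Int)).foldl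
          (fun s q => if q.2 = PySem.List.pyGetD p (PySem.Int.mod q.1 (p.length : Int)) 0
            then s + 1 else s) c := by
  intro ans
  induction ans with
  | nil => intro k c; simp [PySem.List.enumerate]
  | cons a t ih =>
    intro k c
    have hmod : PySem.Int.mod (k : Int) (p.length : Int) = ((k % p.length : Nat) : Int) :=
      PySem.Int.mod_natCast k p.length
    simp only [List.length_cons, List.range'_succ, List.map_cons, List.zip_cons_cons,
      List.foldl_cons, PySem.List.enumerate_cons, hmod, PySem.List.pyGetD_natCast]
    have hinit : (if p.getD (k % p.length) 0 = a then c + 1 else c)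
        = (if a = p.getD (k % p.length) 0 then c + 1 else c) := by
      by_cases h : a = p.getD (k % p.length) 0
      · rw [if_pos h.symm, if_pos h]
      · rw [if_neg (fun hh => h hh.symm), if_neg h]
    rw [hinit]
    have := ih (k + 1) (if a = p.getD (k % p.length) 0 then c + 1 else c)
    push_cast at this
    exact this

-- the three counts agree: A's build-then-count equals B's modular fold
theorem pv_count_pattern (p ans : List Int) (hp : 0 < p.length) :
    pvCount (pvMakeStrings p ans) ans
      = (PySem.List.enumerate ans 0).foldl
          (fun s q => if q.2 = PySem.List.pyGetD p (PySem.Int.mod q.1 (p.length : Int)) 0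
            then s + 1 else s) 0 := by
  unfold pvCount
  rw [pv_make_eq p ans hp, List.range_eq_range']
  exact pv_count_enum p ans 0 0

-- ===== VERDICT (by name: the statement is the Claim_ definition above) =====
theorem solution_spec : Claim_equal_solution := by
  intro answers _
  unfold Spec_solution
  show solution answers = solution_alt answers
  simp only [solution, solution_alt]
  rw [pv_count_pattern [1,2,3,4,5] answers (by decide),
      pv_count_pattern [2,1,2,3,2,4,2,5] answers (by decide),
      pv_count_pattern [3,3,1,1,2,2,4,4,5,5] answers (by decide),
      pv_foldl_triple (PySem.List.enumerate answers 0)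
        (fun x q => if q.2 = PySem.List.pyGetD [1,2,3,4,5] (PySem.Int.mod q.1 5) 0 then x + 1 else x)
        (fun x q => if q.2 = PySem.List.pyGetD [2,1,2,3,2,4,2,5] (PySem.Int.mod q.1 8) 0 then x + 1 else x)
        (fun x q => if q.2 = PySem.List.pyGetD [3,3,1,1,2,2,4,4,5,5] (PySem.Int.mod q.1 10) 0 then x + 1 else x)
        0 0 0]
  norm_num
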